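-- pv_equiv track=rewrite | github.com/rookinc/hyperxi_lab | scripts/vertex_connection_model.py | common_neighbor_profiles
-- ===== SOURCE A (Python) =====
-- from collections import Counter, defaultdict
-- from typing import Dict, List, Set, Tuple
--
-- def common_neighbor_profiles(adj: Dict[int, Set[int]]) -> Tuple[Counter, Counter]:
--     nodes = sorted(adj)
--     prof_adj = Counter()
--     prof_non = Counter()
--     for i, u in enumerate(nodes):
--         for v in nodes[i + 1:]:
--             c = len(adj[u] & adj[v])
--             if v in adj[u]:
--                 prof_adj[c] += 1
--             else:
--                 prof_non[c] += 1
--     return prof_adj, prof_non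
-- ===== SOURCE B (Python) =====
-- from collections import Counter, defaultdict
--
-- def common_neighbor_profiles(adj):
--     nodes = sorted(adj)
--     # inverted index: w -> list (in sorted-node order) of nodes u with w in adj[u]
--     index = defaultdict(list)
--     for u in nodes:
--         for w in adj[u]:
--             index[w].append(u)
--     # common-neighbor count per node pair (u, v), u < v: one hit per witness w
--     cnt = Counter((u, v)
--                   for members in index.values()
--                   for i, u in enumerate(members)
--                   for v in members[i + 1:])
--     prof_adj = Counter()
--     prof_non = Counter()
--     for i, u in enumerate(nodes):
--         for v in nodes[i + 1:]:
--             if v in adj[u]: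
--                 prof_adj[cnt[(u, v)]] += 1
--             else:
--                 prof_non[cnt[(u, v)]] += 1
--     return prof_adj, prof_non
-- ===== Notes on version B (the rewrite author's own statement) =====
-- stated objective: alternative
-- what changed: Instead of computing a set intersection for every node pair, B builds an inverted index (common neighbour -> adjacent nodes) and accumulates a pair->count Counter from it once, so the O(n^2) pair loop only does an O(1) dictionary lookup per pair.
import Mathlib
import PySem

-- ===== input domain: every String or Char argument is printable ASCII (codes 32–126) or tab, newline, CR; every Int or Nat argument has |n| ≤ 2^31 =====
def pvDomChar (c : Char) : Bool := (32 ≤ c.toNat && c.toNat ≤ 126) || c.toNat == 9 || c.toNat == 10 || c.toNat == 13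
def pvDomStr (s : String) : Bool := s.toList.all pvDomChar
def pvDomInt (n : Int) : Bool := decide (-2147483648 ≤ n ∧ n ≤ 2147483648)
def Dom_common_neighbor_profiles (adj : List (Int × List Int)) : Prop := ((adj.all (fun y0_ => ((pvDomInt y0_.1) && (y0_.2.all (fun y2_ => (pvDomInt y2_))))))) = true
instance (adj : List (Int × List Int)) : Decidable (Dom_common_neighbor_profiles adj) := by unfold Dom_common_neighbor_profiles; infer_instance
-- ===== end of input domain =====

-- B replaces A's per-pair set intersection by a pair→count dictionary accumulated once from an
-- inverted index (for each common neighbour, the nodes adjacent to it); the pair loop then only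
-- looks counts up (objective: alternative — a different algorithm of comparable measured cost).

-- shared helpers: both Pythons start from the same dict, sorted node list and neighbour sets

def pvD (adj : List (Int × List Int)) : PySem.Dict Int (List Int) := PySem.Dict.ofList adj
def pvNodes (adj : List (Int × List Int)) : List Int := PySem.List.sorted (pvD adj).keys (fun x => x) false
def pvNbr (adj : List (Int × List Int)) (u : Int) : PySem.Set Int := PySem.Set.ofList ((pvD adj).getD u [])

-- ===== PORT A =====
def common_neighbor_profiles (adj : List (Int × List Int)) : (List (Int × Int)) × (List (Int × Int)) :=
  let res := (PySem.List.enumerate (pvNodes adj) 0).foldl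
    (fun st iu =>
      (PySem.List.slice (pvNodes adj) (some (iu.1 + 1)) none).foldl
        (fun st v =>
          let c : Int := PySem.Set.len (PySem.Set.inter (pvNbr adj iu.2) (pvNbr adj v))
          if PySem.Set.contains (pvNbr adj iu.2) v
          then (st.1.modify c 0 (· + 1), st.2)
          else (st.1, st.2.modify c 0 (· + 1)))
        st)
    (PySem.Dict.empty, PySem.Dict.empty)
  (res.1.items, res.2.items)

-- ===== PORT B =====
-- inverted index: w -> list (in sorted-node order) of nodes u with w in adj[u]
def pvIndex (adj : List (Int × List Int)) : PySem.Dict Int (List Int) :=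
  (pvNodes adj).foldl
    (fun ix u => (pvNbr adj u).foldl (fun ix w => ix.modify w [] (· ++ [u])) ix)
    PySem.Dict.empty
-- Counter((u, v) for members in index.values() for i, u in enumerate(members) for v in members[i+1:])
def pvCnt (adj : List (Int × List Int)) : PySem.Dict (Int × Int) Int :=
  PySem.Dict.counter
    ((pvIndex adj).values.flatMap (fun m =>
      (PySem.List.enumerate m 0).flatMap (fun iu =>
        (PySem.List.slice m (some (iu.1 + 1)) none).map (fun v => (iu.2, v)))))
def common_neighbor_profiles_alt (adj : List (Int × List Int)) : (List (Int × Int)) × (List (Int × Int)) :=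
  let res := (PySem.List.enumerate (pvNodes adj) 0).foldl
    (fun st iu =>
      (PySem.List.slice (pvNodes adj) (some (iu.1 + 1)) none).foldl
        (fun st v =>
          let c : Int := (pvCnt adj).getD (iu.2, v) 0
          if PySem.Set.contains (pvNbr adj iu.2) v
          then (st.1.modify c 0 (· + 1), st.2)
          else (st.1, st.2.modify c 0 (· + 1)))
        st)
    (PySem.Dict.empty, PySem.Dict.empty)
  (res.1.items, res.2.items)

-- ===== PRECONDITION & SPEC =====
def Spec_common_neighbor_profiles (adj : List (Int × List Int)) (out : (List (Int × Int)) × (List (Int × Int))) : Prop := out = common_neighbor_profiles_alt adj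
instance (adj : List (Int × List Int)) (out : (List (Int × Int)) × (List (Int × Int))) : Decidable (Spec_common_neighbor_profiles adj out) := by unfold Spec_common_neighbor_profiles; infer_instance

-- ===== CLAIM (what is proved, stated in full; the proofs are below) =====
def Claim_equal_common_neighbor_profiles : Prop := ∀ (adj : List (Int × List Int)), Dom_common_neighbor_profiles adj → Spec_common_neighbor_profiles adj (common_neighbor_profiles adj)

-- ===== LEMMAS AND PROOFS =====

-- the flattened (common-neighbour, node) stream B's index loop processes

def pvWU (adj : List (Int × List Int)) : List (Int × Int) :=
  (pvNodes adj).flatMap (fun u => (pvNbr adj u).map (fun w => (w, u)))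

-- the recursive shape of "all ordered pairs (m[i], m[j]), i < j" of a member list
def pvPairsOf : List Int → List (Int × Int)
  | [] => []
  | x :: t => t.map (fun v => (x, v)) ++ pvPairsOf t

lemma pvNodes_nodup (adj : List (Int × List Int)) : (pvNodes adj).Nodup :=
  ((PySem.List.sorted_perm _ _ _).nodup_iff).mpr (PySem.Dict.nodup_keys_ofList adj)

lemma pvNodes_pairwise (adj : List (Int × List Int)) : (pvNodes adj).Pairwise (· < ·) := by
  have h1 := PySem.List.sorted_pairwise (pvD adj).keys (fun x => x)
  have h2 := pvNodes_nodup adj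
  exact (h1.and h2).imp (fun h => lt_of_le_of_ne h.1 h.2)

lemma pvIndex_eq (adj : List (Int × List Int)) :
    pvIndex adj = (pvWU adj).foldl (fun d p => d.modify p.1 [] (fun xs => xs ++ [p.2])) PySem.Dict.empty := by
  unfold pvIndex pvWU
  rw [List.foldl_flatMap]
  exact PySem.List.foldl_congr_mem _ _ _ _ (fun acc u _ => by rw [List.foldl_map])

lemma pvIndex_keys (adj : List (Int × List Int)) :
    (pvIndex adj).keys = PySem.Set.ofList ((pvWU adj).map Prod.fst) := by
  rw [pvIndex_eq, PySem.Dict.keys_foldl_modify_key (key := Prod.fst) (f := fun _ p xs => xs ++ [p.2])]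
  simp [PySem.Dict.keys_empty, PySem.Set.update, PySem.Set.ofList_eq_foldl]

lemma pvIndex_keys_nodup (adj : List (Int × List Int)) : (pvIndex adj).keys.Nodup := by
  rw [pvIndex_keys]; exact PySem.Set.nodup_ofList _

lemma pv_members_aux (w : Int) : ∀ (l : List Int) (f : Int → PySem.Set Int), (∀ u, (f u).Nodup) →
    ((l.flatMap (fun u => (f u).map (fun w' => (w', u)))).filter (fun p => p.1 == w)).map (fun p => p.2)
    = l.filter (fun u => (f u).contains w) := by
  intro l f hf
  induction l with
  | nil => simp
  | cons x t ih =>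
    simp only [List.flatMap_cons, List.filter_append, List.map_append, ih, List.filter_cons]
    by_cases hc : w ∈ f x
    · have hcon : (f x).contains w = true := (PySem.Set.contains_iff _ _).mpr hc
      simp only [hcon, if_pos]
      have : ((f x).map (fun w' => ((w', x) : Int × Int))).filter (fun p => p.1 == w)
          = ((f x).filter (fun w' => w' == w)).map (fun w' => ((w', x) : Int × Int)) := by
        rw [List.filter_map]; rfl
      rw [this]
      have : (f x).filter (fun w' => w' == w) = [w] := by
        have := List.filter_eq (l := (f x)) (a := w)
        have hcount : List.count w (f x) = 1 := List.count_eq_one_of_mem (hf x) hc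
        rw [hcount] at this
        calc List.filter (fun w' => w' == w) (f x)
            = List.filter (fun x => decide (x = w)) (f x) := by
              apply List.filter_congr; intro a _; rfl
          _ = [w] := by rw [this]; rfl
      simp [this]
    · have hcon : (f x).contains w = false := by
        rw [← Bool.not_eq_true, PySem.Set.contains_iff]; exact hc
      simp only [hcon]
      have : ((f x).map (fun w' => ((w', x) : Int × Int))).filter (fun p => p.1 == w) = [] := by
        rw [List.filter_eq_nil_iff]
        rintro p hp
        rcases List.mem_map.mp hp with ⟨w', hw', rfl⟩
        simp only [beq_iff_eq]
        rintro rfl; exact hc hw'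
      simp [this]

lemma pvIndex_getD (adj : List (Int × List Int)) (w : Int) :
    (pvIndex adj).getD w [] = (pvNodes adj).filter (fun u => (pvNbr adj u).contains w) := by
  rw [pvIndex_eq, PySem.Dict.getD_foldl_modify_append]
  rw [show (PySem.Dict.empty : PySem.Dict Int (List Int)).getD w [] = [] from PySem.Dict.getD_empty _ _]
  rw [List.nil_append]
  exact pv_members_aux w (pvNodes adj) (pvNbr adj) (fun u => PySem.Set.nodup_ofList _)

lemma mem_pvIndex_keys (adj : List (Int × List Int)) (w : Int) :
    w ∈ (pvIndex adj).keys ↔ ∃ u ∈ pvNodes adj, w ∈ pvNbr adj u := by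
  rw [pvIndex_keys, PySem.Set.mem_ofList]
  simp only [pvWU, List.mem_map, List.mem_flatMap]
  constructor
  · rintro ⟨p, ⟨u, hu, ⟨w', hw', hp⟩⟩, rfl⟩
    subst hp
    exact ⟨u, hu, hw'⟩
  · rintro ⟨u, hu, hw⟩
    exact ⟨(w, u), ⟨u, hu, ⟨w, hw, rfl⟩⟩, rfl⟩

lemma pairs_expr_eq (n : List Int) : ∀ (m : List Int) (j : Nat), m = n.drop j →
    (PySem.List.enumerate m (j : Int)).flatMap (fun iu =>
      (PySem.List.slice n (some (iu.1 + 1)) none).map (fun v => (iu.2, v))) = pvPairsOf m := by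
  intro m
  induction m with
  | nil => intro j _; simp [PySem.List.enumerate, pvPairsOf]
  | cons x t ih =>
    intro j hj
    have hd : t = n.drop (j + 1) := by
      rw [← List.tail_drop, ← hj]
      rfl
    have hcast : ((j : Int) + 1) = ((j + 1 : Nat) : Int) := by push_cast; ring
    rw [PySem.List.enumerate_cons, List.flatMap_cons, hcast, ih (j + 1) hd]
    show List.map (fun v => (x, v)) (PySem.List.slice n (some ((j + 1 : Nat) : Int))) ++ pvPairsOf t = pvPairsOf (x :: t)
    rw [PySem.List.slice_from_natCast, ← hd]
    rfl

lemma count_pvPairsOf (u v : Int) (huv : u < v) :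
    ∀ (m : List Int), m.Pairwise (· < ·) →
    (pvPairsOf m).count (u, v) = if u ∈ m ∧ v ∈ m then 1 else 0 := by
  intro m
  induction m with
  | nil => intro _; simp [pvPairsOf]
  | cons x t ih =>
    intro hm
    rcases List.pairwise_cons.mp hm with ⟨hx, ht⟩
    have hnd : t.Nodup := ht.imp (fun h => ne_of_lt h)
    rw [show pvPairsOf (x :: t) = t.map (fun v' => (x, v')) ++ pvPairsOf t from rfl,
        List.count_append, ih ht]
    by_cases hxu : x = u
    · rcases hxu with rfl
      have hut : x ∉ t := fun h => lt_irrefl x (hx x h)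
      have hvx : v ≠ x := ne_of_gt huv
      have hmap : (t.map (fun v' => ((x, v') : Int × Int))).count (x, v) = t.count v := by
        have hinj : Function.Injective (fun v' => ((x, v') : Int × Int)) := by
          intro a b h; simpa using h
        exact List.count_map_of_injective t _ hinj v
      rw [hmap]
      have hct : t.count v = if v ∈ t then 1 else 0 := by
        by_cases hv : v ∈ t
        · simp [hv, List.count_eq_one_of_mem hnd hv]
        · simp [hv, List.count_eq_zero_of_not_mem hv]
      simp only [hct, List.mem_cons]
      by_cases hv : v ∈ t <;> simp [hv, hut, hvx]
    · have hmap : (t.map (fun v' => ((x, v') : Int × Int))).count (u, v) = 0 := by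
        apply List.count_eq_zero_of_not_mem
        intro h
        rcases List.mem_map.mp h with ⟨w', _, heq⟩
        exact hxu (congrArg Prod.fst heq)
      rw [hmap, Nat.zero_add]
      have hux : u ≠ x := fun h => hxu h.symm
      by_cases hut : u ∈ t
      · have hvx : v ≠ x := by
          intro h; subst h; exact absurd (hx u hut) (not_lt_of_gt huv)
        simp [List.mem_cons, hux, hvx]
      · simp [List.mem_cons, hux, hut]

lemma pvCnt_getD (adj : List (Int × List Int)) (u v : Int)
    (hu : u ∈ pvNodes adj) (hv : v ∈ pvNodes adj) (huv : u < v) :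
    (pvCnt adj).getD (u, v) 0 = PySem.Set.len (PySem.Set.inter (pvNbr adj u) (pvNbr adj v)) := by
  unfold pvCnt
  rw [PySem.Dict.getD_counter]
  -- each member-list comprehension is pvPairsOf of that member list
  have hexpr : ∀ m : List Int,
      (PySem.List.enumerate m 0).flatMap (fun iu =>
        (PySem.List.slice m (some (iu.1 + 1)) none).map (fun v => (iu.2, v))) = pvPairsOf m := by
    intro m
    have := pairs_expr_eq m m 0 rfl
    simpa using this
  conv_lhs => rw [List.flatMap_congr (fun m _ => hexpr m)]
  rw [PySem.Dict.values_eq_map_keys _ (pvIndex_keys_nodup adj) [],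
      List.flatMap_map, List.count_flatMap]
  have hmem : ∀ w, (pvIndex adj).getD w [] = (pvNodes adj).filter (fun x => (pvNbr adj x).contains w) :=
    pvIndex_getD adj
  have hterm : ∀ w, (List.count (u, v) ∘ fun a => pvPairsOf ((pvIndex adj).getD a []))  w
      = if ((pvNbr adj u).contains w && (pvNbr adj v).contains w) then 1 else 0 := by
    intro w
    show (pvPairsOf ((pvIndex adj).getD w [])).count (u, v) = _
    rw [hmem w, count_pvPairsOf u v huv _ ((pvNodes_pairwise adj).filter _)]
    simp only [List.mem_filter, Bool.and_eq_true]
    simp [hu, hv]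

  rw [List.map_congr_left (fun w _ => hterm w), PySem.List.sum_map_ite_one_zero_nat,
      List.countP_eq_length_filter]
  -- both sides count the same finite set of common neighbours
  have hperm : ((pvIndex adj).keys.filter (fun w => (pvNbr adj u).contains w && (pvNbr adj v).contains w)).Perm
      ((pvNbr adj u).filter (fun w => (pvNbr adj v).contains w)) := by
    have hnb : (pvNbr adj u).Nodup := by unfold pvNbr; exact PySem.Set.nodup_ofList _
    rw [List.perm_ext_iff_of_nodup ((pvIndex_keys_nodup adj).filter _) (hnb.filter _)]
    intro w
    simp only [List.mem_filter, Bool.and_eq_true, PySem.Set.contains_iff]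
    constructor
    · rintro ⟨_, h1, h2⟩; exact ⟨h1, h2⟩
    · rintro ⟨h1, h2⟩
      exact ⟨(mem_pvIndex_keys adj w).mpr ⟨u, hu, h1⟩, h1, h2⟩
  rw [hperm.length_eq]
  rfl

lemma pair_items_congr {r s : PySem.Dict Int Int × PySem.Dict Int Int} (h : r = s) :
    (r.1.items, r.2.items) = (s.1.items, s.2.items) := by rw [h]

theorem ports_eq (adj : List (Int × List Int)) :
    common_neighbor_profiles adj = common_neighbor_profiles_alt adj := by
  simp only [common_neighbor_profiles, common_neighbor_profiles_alt]
  apply pair_items_congr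
  apply PySem.List.foldl_congr_mem
  intro acc iu hiu
  rcases (PySem.List.mem_enumerate_iff _ _ _).mp hiu with ⟨k, hk, rfl⟩
  apply PySem.List.foldl_congr_mem
  intro acc2 v hv
  have hidx : ((0 : Int) + (k : Int), (pvNodes adj)[k]).1 + 1 = ((k + 1 : Nat) : Int) := by
    push_cast; ring
  rw [hidx, PySem.List.slice_from_natCast] at hv
  have hvmem : v ∈ pvNodes adj := List.mem_of_mem_drop hv
  have humem : (pvNodes adj)[k] ∈ pvNodes adj := List.getElem_mem hk
  have hlt : (pvNodes adj)[k] < v := by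
    rcases List.mem_iff_getElem.mp hv with ⟨j, hj, rfl⟩
    rw [List.getElem_drop]
    have hjlt : k + 1 + j < (pvNodes adj).length := by
      have := hj; simp [List.length_drop] at this; omega
    exact List.pairwise_iff_getElem.mp (pvNodes_pairwise adj) k (k + 1 + j) hk hjlt (by omega)
  simp only [pvCnt_getD adj _ v humem hvmem hlt]

-- ===== VERDICT (by name: the statement is the Claim_ definition above) =====
theorem common_neighbor_profiles_spec : Claim_equal_common_neighbor_profiles := by
  intro adj _
  unfold Spec_common_neighbor_profiles
  exact ports_eq adj
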